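-- pv_equiv track=rewrite | github.com/Aman-Godara/Programming_Problems | Recursion/Amazon.py | decodings
-- ===== SOURCE A (Python) =====
-- def decodings(past, i, signal):
--     if i == len(signal):
--         return []
--         # i has exceed last possible index: return []
--         # past may or may not be empty; return [] for both cases
--     elif past:
--         # past is not empty: merge ith term with past
--         number = int(past + signal[i])
--         if number > 26:
--             # merging with past is not possible: return []
--             return []
--         else:
--             # merging with past is possible
--             new_past = chr(number + 96)
--             return add_str_to_strlist(new_past, decodings('', i + 1, signal))
--     else:
--         # past is empty: 2 possiblities for ith term
--         new_past = chr(int(signal[i]) + 96)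
--         out = decodings(signal[i], i + 1, signal) + add_str_to_strlist(new_past, decodings('', i + 1, signal))
--         return out
--
-- def add_str_to_strlist(str_add, str_list):
--     # str_list is an empty list ([]): return a list with only str_add in it ([str_add])
--     # str_list is an non empty list (['a', 'bc', 'adf']): return a list of same size with str_add ('w') contatenated to each term (['wa', 'wbc', 'wadf'])
--     if str_list:
--         for i in range(0, len(str_list)):
--             str_list[i] = str_add + str_list[i]
--         return str_list
--     else:
--         return [str_add]
-- ===== SOURCE B (Python) =====
-- def decodings(past, i, s):
--     n = len(s)
--     if i == n:
--         return []
--     if past: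
--         number = int(past + s[i])
--         if number > 26:
--             return []
--         head = chr(number + 96)
--         tail = _suffixes(s, i + 1)
--         return [head + t for t in tail] or [head]
--     return _suffixes(s, i)
--
--
-- def _suffixes(s, start):
--     # iterative bottom-up table over suffixes: dp1 = decodings of s[j+1:], dp2 = of s[j+2:]
--     n = len(s)
--     dp1, dp2 = [], []
--     for j in reversed(range(start, n)):
--         two = []
--         if j + 1 < n:
--             num = int(s[j] + s[j + 1])
--             if num <= 26:
--                 c = chr(num + 96)
--                 two = [c + t for t in dp2] or [c]
--         c1 = chr(int(s[j]) + 96)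
--         one = [c1 + t for t in dp1] or [c1]
--         dp1, dp2 = two + one, dp1
--     return dp1
-- ===== Notes on version B (the rewrite author's own statement) =====
-- stated objective: alternative
-- what changed: Replaces A's branching recursion (which re-derives every suffix's decoding list once per caller) by an iterative bottom-up two-cell table over suffixes, each suffix's decoding list computed exactly once.
import Mathlib
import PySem

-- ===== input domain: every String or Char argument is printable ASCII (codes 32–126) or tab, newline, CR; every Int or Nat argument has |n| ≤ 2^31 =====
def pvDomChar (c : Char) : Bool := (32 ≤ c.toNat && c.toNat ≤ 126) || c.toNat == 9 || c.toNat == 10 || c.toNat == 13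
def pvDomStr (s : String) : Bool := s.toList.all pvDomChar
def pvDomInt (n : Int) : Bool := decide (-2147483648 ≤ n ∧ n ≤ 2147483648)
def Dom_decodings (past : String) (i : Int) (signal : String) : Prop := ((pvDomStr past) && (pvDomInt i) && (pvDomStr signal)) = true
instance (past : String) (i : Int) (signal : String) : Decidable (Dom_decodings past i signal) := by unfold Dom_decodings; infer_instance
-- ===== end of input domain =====

-- B replaces A's branching re-reading recursion by an iterative bottom-up table over suffixes (alternative decomposition); return-value equivalence only (A mutates the lists returned by its recursive calls in place, B does not).


-- ===== PORT A =====
-- strings are handled on the List Char side (PySem convention); the wrappers map String.ofList at the boundary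

-- add_str_to_strlist: mutation loop ported as a map over the same list
def addStrToStrlist (strAdd : List Char) (strList : List (List Char)) : List (List Char) :=
  if strList ≠ [] then strList.map (fun t => strAdd ++ t) else [strAdd]

-- decodings: literal recursion; where Python raises (IndexError from signal[i], ValueError from int(...),
-- chr of a negative code) the PySem primitive is none and the port returns [] — those inputs are outside Pre_
def decodingsCore (past : List Char) (i : Int) (signal : List Char) : List (List Char) :=
  if i = (signal.length : Int) then []
  else
    match h : PySem.List.pyGet? signal i with
    | none => []   -- Python: IndexError
    | some c =>
      if past ≠ [] then
        match PySem.Int.ofChars? (past ++ [c]) with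
        | none => []   -- Python: ValueError
        | some number =>
          if 26 < number then []
          else addStrToStrlist [Char.ofNat (number + 96).toNat] (decodingsCore [] (i + 1) signal)
      else
        match PySem.Int.ofChars? [c] with
        | none => []   -- Python: ValueError
        | some d =>
          decodingsCore [c] (i + 1) signal ++
            addStrToStrlist [Char.ofNat (d + 96).toNat] (decodingsCore [] (i + 1) signal)
termination_by ((signal.length : Int) + 1 - i).toNat
decreasing_by
  all_goals
    (have h2 := (PySem.List.pyGet?_eq_none_iff (xs := signal) (i := i))
     have hlt : i < (signal.length : Int) := by
       by_cases hr : PySem.Raise.InRange signal.length i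
       · unfold PySem.Raise.InRange at hr; omega
       · rw [h2.2 hr] at h; cases h
     omega)

def decodings (past : String) (i : Int) (signal : String) : List String :=
  (decodingsCore past.toList i signal.toList).map String.ofList

-- ===== PORT B =====
-- '[c + s for s in l] or [c]'
def prependOr (c : List Char) (l : List (List Char)) : List (List Char) :=
  match l with
  | [] => [c]
  | _ => l.map (fun s => c ++ s)

-- one iteration of Source B's loop body on the state (dp1, dp2) = (dp[j+1], dp[j+2])
def suffixStep (signal : List Char) (j : Int) (st : List (List Char) × List (List Char)) :
    List (List Char) × List (List Char) :=
  let two : List (List Char) :=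
    if j + 1 < (signal.length : Int) then
      match PySem.List.pyGet? signal j, PySem.List.pyGet? signal (j + 1) with
      | some a, some b =>
        match PySem.Int.ofChars? [a, b] with
        | none => []   -- Python: ValueError
        | some num =>
          if num ≤ 26 then prependOr [Char.ofNat (num + 96).toNat] st.2 else []
      | _, _ => []     -- Python: IndexError
    else []
  let one : List (List Char) :=
    match PySem.List.pyGet? signal j with
    | some a =>
      match PySem.Int.ofChars? [a] with
      | none => []     -- Python: ValueError
      | some d => prependOr [Char.ofNat (d + 96).toNat] st.1
    | none => []       -- Python: IndexError
  (two ++ one, st.1)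

-- _suffixes: 'for j in reversed(range(start, n))' folding the two-cell state
def suffixes (signal : List Char) (start : Int) : List (List Char) :=
  ((PySem.List.pyRange start (signal.length : Int) 1).reverse.foldl
    (fun st j => suffixStep signal j st) ([], [])).1

def decodingsAltCore (past : List Char) (i : Int) (signal : List Char) : List (List Char) :=
  if i = (signal.length : Int) then []
  else if past ≠ [] then
    match PySem.List.pyGet? signal i with
    | none => []       -- Python: IndexError
    | some c =>
      match PySem.Int.ofChars? (past ++ [c]) with
      | none => []     -- Python: ValueError
      | some number =>
        if 26 < number then []
        else prependOr [Char.ofNat (number + 96).toNat] (suffixes signal (i + 1))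
  else suffixes signal i

def decodings_alt (past : String) (i : Int) (signal : String) : List String :=
  (decodingsAltCore past.toList i signal.toList).map String.ofList

-- ===== PRECONDITION & SPEC =====
-- Pre_ admits exactly the inputs on which Python A returns normally (no exception): -len ≤ i ≤ len and either
-- i = len (immediate []), or a merged past whose int value exceeds 26 (immediate []), or digit characters from
-- position i (from i+1 with a non-empty past; negative positions wrap, so then the whole string) onward together
-- with a chr code ≥ 0.  Everything outside raises IndexError, ValueError or a chr ValueError in Python.
-- all characters of signal from (possibly negative, Python-style) position m onward are digits
def digitsFromI (signal : List Char) (m : Int) : Bool :=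
  if m < 0 then signal.all Char.isDigit else (signal.drop m.toNat).all Char.isDigit

def preCheckCore (past : List Char) (i : Int) (signal : List Char) : Bool :=
  decide (-(signal.length : Int) ≤ i) && decide (i ≤ (signal.length : Int)) &&
    (decide (i = (signal.length : Int)) ||
      (if past = [] then
          digitsFromI signal i
       else
          (PySem.List.pyGet? signal i).elim false (fun c =>
            (PySem.Int.ofChars? (past ++ [c])).elim false (fun v =>
              decide (26 < v) || (decide (-96 ≤ v) && digitsFromI signal (i + 1))))))

def Pre_decodings (past : String) (i : Int) (signal : String) : Prop :=
  preCheckCore past.toList i signal.toList = true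
instance (past : String) (i : Int) (signal : String) : Decidable (Pre_decodings past i signal) := by
  unfold Pre_decodings; infer_instance

def pvWitness_decodings : String × Int × String := ("", 0, "1225")

def Spec_decodings (past : String) (i : Int) (signal : String) (out : List String) : Prop := out = decodings_alt past i signal
instance (past : String) (i : Int) (signal : String) (out : List String) : Decidable (Spec_decodings past i signal out) := by unfold Spec_decodings; infer_instance

-- ===== CLAIM (what is proved, stated in full; the proofs are below) =====
def Claim_equal_decodings : Prop := ∀ (past : String) (i : Int) (signal : String), Dom_decodings past i signal → Pre_decodings past i signal → Spec_decodings past i signal (decodings past i signal)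

-- ===== LEMMAS AND PROOFS =====

theorem digit_cases (c : Char) (h : c.isDigit = true) :
    c = '0' ∨ c = '1' ∨ c = '2' ∨ c = '3' ∨ c = '4' ∨ c = '5' ∨ c = '6' ∨ c = '7' ∨ c = '8' ∨ c = '9' := by
  have h2 : 48 ≤ c.toNat ∧ c.toNat ≤ 57 := by
    simp [Char.isDigit] at h
    exact ⟨h.1, h.2⟩
  have hv : c.toNat = 48 ∨ c.toNat = 49 ∨ c.toNat = 50 ∨ c.toNat = 51 ∨ c.toNat = 52 ∨ c.toNat = 53 ∨
      c.toNat = 54 ∨ c.toNat = 55 ∨ c.toNat = 56 ∨ c.toNat = 57 := by omega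
  have key : ∀ n, c.toNat = n → c = Char.ofNat n := fun n hn => hn ▸ (Char.ofNat_toNat c).symm
  rcases hv with h|h|h|h|h|h|h|h|h|h
  · exact Or.inl (key _ h)
  · exact Or.inr (Or.inl (key _ h))
  · exact Or.inr (Or.inr (Or.inl (key _ h)))
  · exact Or.inr (Or.inr (Or.inr (Or.inl (key _ h))))
  · exact Or.inr (Or.inr (Or.inr (Or.inr (Or.inl (key _ h)))))
  · exact Or.inr (Or.inr (Or.inr (Or.inr (Or.inr (Or.inl (key _ h))))))
  · exact Or.inr (Or.inr (Or.inr (Or.inr (Or.inr (Or.inr (Or.inl (key _ h)))))))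
  · exact Or.inr (Or.inr (Or.inr (Or.inr (Or.inr (Or.inr (Or.inr (Or.inl (key _ h))))))))
  · exact Or.inr (Or.inr (Or.inr (Or.inr (Or.inr (Or.inr (Or.inr (Or.inr (Or.inl (key _ h)))))))))
  · exact Or.inr (Or.inr (Or.inr (Or.inr (Or.inr (Or.inr (Or.inr (Or.inr (Or.inr (key _ h)))))))))

theorem ofChars?_digit (c : Char) (h : c.isDigit = true) :
    PySem.Int.ofChars? [c] = some ((c.toNat : Int) - 48) := by
  rcases digit_cases c h with h|h|h|h|h|h|h|h|h|h <;> subst h <;> decide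

theorem addStr_eq_prependOr (s : List Char) (l : List (List Char)) :
    addStrToStrlist s l = prependOr s l := by
  cases l <;> simp [addStrToStrlist, prependOr]

theorem allDrop_get (sig : List Char) (m k : Nat) (h : (sig.drop m).all Char.isDigit = true)
    (hm : m ≤ k) (hk : k < sig.length) : (sig[k]).isDigit = true := by
  have hmem : sig[k] ∈ sig.drop m := by
    have hlt : k - m < (sig.drop m).length := by simp [List.length_drop]; omega
    have : (sig.drop m)[k - m] = sig[k] := by
      rw [List.getElem_drop]
      congr 1; omega
    rw [← this]
    exact List.getElem_mem hlt
  exact List.all_eq_true.mp h _ hmem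

theorem allDrop_mono (sig : List Char) (m m' : Nat) (h : (sig.drop m).all Char.isDigit = true)
    (hm : m ≤ m') : (sig.drop m').all Char.isDigit = true := by
  rw [List.all_eq_true] at h ⊢
  intro x hx
  have hdd : List.drop m' sig = List.drop (m' - m) (List.drop m sig) := by
    rw [List.drop_drop]; congr 1; omega
  exact h x (List.mem_of_mem_drop (i := m' - m) (by rwa [hdd] at hx))

-- A returns [] at or beyond the end of the signal
theorem A_past_len (past : List Char) (j : Int) (sig : List Char) (h : (sig.length : Int) ≤ j) :
    decodingsCore past j sig = [] := by
  rw [decodingsCore]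
  by_cases hj : j = (sig.length : Int)
  · rw [if_pos hj]
  · rw [if_neg hj]
    split
    · rfl
    · next c heq =>
      have : PySem.List.pyGet? sig j = none := by
        rw [PySem.List.pyGet?_eq_none_iff]
        unfold PySem.Raise.InRange
        omega
      rw [this] at heq
      cases heq

theorem pyGet?_some_of_inrange (xs : List Char) (i : Int) (h1 : -(xs.length : Int) ≤ i)
    (h2 : i < (xs.length : Int)) : ∃ c, PySem.List.pyGet? xs i = some c := by
  cases hg : PySem.List.pyGet? xs i with
  | some c => exact ⟨c, rfl⟩
  | none =>
    rw [PySem.List.pyGet?_eq_none_iff] at hg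
    unfold PySem.Raise.InRange at hg
    omega

theorem digitsFromI_mono (sig : List Char) (m m' : Int) (h : digitsFromI sig m = true)
    (hm : m ≤ m') : digitsFromI sig m' = true := by
  unfold digitsFromI at h ⊢
  by_cases h1 : m' < 0
  · rw [if_pos h1]
    rw [if_pos (by omega)] at h
    exact h
  · rw [if_neg h1]
    by_cases h2 : m < 0
    · rw [if_pos h2] at h
      have : (sig.drop 0).all Char.isDigit = true := by simpa using h
      exact allDrop_mono sig 0 m'.toNat this (by omega)
    · rw [if_neg h2] at h
      exact allDrop_mono sig m.toNat m'.toNat h (by omega)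

-- at any in-range (possibly negative) position of an all-digit region, the signal holds a digit
theorem get_digit (sig : List Char) (j : Int) (hlo : -(sig.length : Int) ≤ j)
    (hj : j < (sig.length : Int)) (hd : digitsFromI sig j = true) :
    ∃ c, PySem.List.pyGet? sig j = some c ∧ c.isDigit = true := by
  obtain ⟨c, hc⟩ := pyGet?_some_of_inrange sig j hlo hj
  refine ⟨c, hc, ?_⟩
  by_cases h0 : 0 ≤ j
  · have hjn : j.toNat < sig.length := by omega
    have hg : PySem.List.pyGet? sig j = some sig[j.toNat] :=
      PySem.List.pyGet?_eq_some_getElem sig h0 hj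
    rw [hg] at hc
    injection hc with hc
    unfold digitsFromI at hd
    rw [if_neg (by omega)] at hd
    rw [← hc]
    exact allDrop_get sig j.toNat j.toNat hd le_rfl hjn
  · unfold digitsFromI at hd
    rw [if_pos (by omega)] at hd
    exact List.all_eq_true.mp hd c (PySem.List.mem_of_pyGet?_eq_some _ hc)

-- one step of the fold preserves the invariant (j may be negative: Python wraparound)
theorem step_inv (sig : List Char) (j : Int) (hlo : -(sig.length : Int) ≤ j)
    (hj : j < (sig.length : Int)) (hd : digitsFromI sig j = true) :
    suffixStep sig j (decodingsCore [] (j + 1) sig, decodingsCore [] (j + 2) sig) =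
      (decodingsCore [] j sig, decodingsCore [] (j + 1) sig) := by
  obtain ⟨c, hget, hdig⟩ := get_digit sig j hlo hj hd
  have hsome := ofChars?_digit _ hdig
  -- unfold A at position j (empty past)
  have hA : decodingsCore [] j sig =
      decodingsCore [c] (j + 1) sig ++
        addStrToStrlist [Char.ofNat ((((c).toNat : Int) - 48) + 96).toNat]
          (decodingsCore [] (j + 1) sig) := by
    rw [decodingsCore]
    rw [if_neg (by omega)]
    split
    · next heq => rw [hget] at heq; cases heq
    · next c' heq =>
      rw [hget] at heq; injection heq with heq; subst heq
      simp only [ne_eq, not_true_eq_false, if_false, hsome]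
  rw [hA]
  -- unfold B's loop body
  simp only [suffixStep, hget, hsome]
  rw [Prod.mk.injEq]
  refine ⟨?_, rfl⟩
  rw [addStr_eq_prependOr]
  congr 1
  -- remains: B's two-digit branch = A's call with past = [signal[j]]
  by_cases hj1 : j + 1 < (sig.length : Int)
  · obtain ⟨c2, hget2, hdig2⟩ := get_digit sig (j + 1) (by omega) hj1
      (digitsFromI_mono sig j (j + 1) hd (by omega))
    rw [if_pos hj1]
    simp only [hget2]
    have hunf : decodingsCore [c] (j + 1) sig =
        match PySem.Int.ofChars? [c, c2] with
        | none => []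
        | some number =>
          if 26 < number then []
          else addStrToStrlist [Char.ofNat ((number + 96)).toNat] (decodingsCore [] (j + 1 + 1) sig) := by
      rw [decodingsCore]
      rw [if_neg (by omega)]
      split
      · next heq => rw [hget2] at heq; cases heq
      · next c' heq =>
        rw [hget2] at heq; injection heq with heq; subst heq
        rw [if_pos (show ([c] : List Char) ≠ [] by simp)]
        rfl
    rw [hunf]
    cases hnum : PySem.Int.ofChars? [c, c2] with
    | none => rfl
    | some num =>
      dsimp only
      by_cases h26 : 26 < num
      · rw [if_pos h26, if_neg (by omega)]
      · rw [if_neg h26, if_pos (by omega)]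
        rw [addStr_eq_prependOr]
        congr 2
        omega
  · rw [if_neg hj1]
    rw [A_past_len _ _ _ (by omega)]

-- fold invariant: after processing j .. n-1 the state is (dp[j], dp[j+1])
theorem fold_inv (sig : List Char) (k : Nat) (j : Int) (hk : j = (sig.length : Int) - k)
    (hlo : -(sig.length : Int) ≤ j) (hd : digitsFromI sig j = true) :
    (PySem.List.pyRange j (sig.length : Int) 1).reverse.foldl
        (fun st j => suffixStep sig j st) ([], []) =
      (decodingsCore [] j sig, decodingsCore [] (j + 1) sig) := by
  induction k generalizing j with
  | zero =>
    have hj : j = (sig.length : Int) := by omega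
    subst hj
    rw [PySem.List.pyRange_one_eq_nil le_rfl]
    rw [A_past_len _ _ _ le_rfl, A_past_len _ _ _ (by omega)]
    rfl
  | succ k ih =>
    have hlt : j < (sig.length : Int) := by omega
    rw [PySem.List.pyRange_one_cons hlt, List.reverse_cons, List.foldl_append]
    rw [ih (j + 1) (by omega) (by omega) (digitsFromI_mono sig j (j + 1) hd (by omega))]
    simp only [List.foldl_cons, List.foldl_nil]
    rw [show j + 1 + 1 = j + 2 by ring]
    exact step_inv sig j hlo hlt hd

theorem suffixes_eq (sig : List Char) (j : Int) (hlo : -(sig.length : Int) ≤ j)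
    (hn : j ≤ (sig.length : Int)) (hd : digitsFromI sig j = true) :
    suffixes sig j = decodingsCore [] j sig := by
  unfold suffixes
  rw [fold_inv sig ((sig.length : Int) - j).toNat j (by omega) hlo hd]

theorem coreEq (past : List Char) (i : Int) (sig : List Char)
    (hpre : preCheckCore past i sig = true) :
    decodingsCore past i sig = decodingsAltCore past i sig := by
  simp only [preCheckCore, Bool.and_eq_true, Bool.or_eq_true, decide_eq_true_eq] at hpre
  obtain ⟨⟨hlo, hn⟩, hrest⟩ := hpre
  by_cases hin : i = (sig.length : Int)
  · rw [A_past_len _ _ _ (by omega)]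
    unfold decodingsAltCore
    rw [if_pos hin]
  · replace hrest : (if past = [] then digitsFromI sig i
      else
        (PySem.List.pyGet? sig i).elim false (fun c =>
          (PySem.Int.ofChars? (past ++ [c])).elim false (fun v =>
            decide (26 < v) || (decide (-96 ≤ v) && digitsFromI sig (i + 1))))) = true := by
      rcases hrest with heq | hb
      · exact absurd heq hin
      · exact hb
    by_cases hpe : past = []
    · subst hpe
      rw [if_pos rfl] at hrest
      unfold decodingsAltCore
      rw [if_neg hin]
      simp only [ne_eq, not_true_eq_false, if_false]
      exact (suffixes_eq sig i hlo (by omega) hrest).symm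
    · rw [if_neg hpe] at hrest
      have hilt : i < (sig.length : Int) := by omega
      obtain ⟨c, hget⟩ := pyGet?_some_of_inrange sig i hlo hilt
      rw [hget] at hrest
      simp only [Option.elim_some] at hrest
      unfold decodingsAltCore
      rw [if_neg hin, if_pos hpe, hget]
      dsimp only
      rw [decodingsCore]
      rw [if_neg hin]
      split
      · next heq => rw [hget] at heq; cases heq
      · next c' heq =>
        rw [hget] at heq; injection heq with heq; subst heq
        rw [if_pos hpe]
        cases hof : PySem.Int.ofChars? (past ++ [c]) with
        | none => simp [hof] at hrest
        | some v =>
          rw [hof] at hrest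
          simp only [Option.elim_some] at hrest
          dsimp only
          by_cases h26 : 26 < v
          · rw [if_pos h26, if_pos h26]
          · rw [if_neg h26, if_neg h26]
            simp only [Bool.or_eq_true, Bool.and_eq_true, decide_eq_true_eq] at hrest
            rcases hrest with hv | ⟨hv96, hdig⟩
            · omega
            · rw [addStr_eq_prependOr]
              congr 1
              rw [suffixes_eq sig (i + 1) (by omega) (by omega) hdig]

-- ===== VERDICT (by name: the statement is the Claim_ definition above) =====
theorem decodings_spec : Claim_equal_decodings := by
  intro past i signal _ hpre
  unfold Spec_decodings decodings decodings_alt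
  rw [coreEq past.toList i signal.toList hpre]
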